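-- pv_equiv track=rewrite | github.com/ki-boudesu63/slidekit-modify-open | builder/md_exporter.py | _get_ordered
-- ===== SOURCE A (Python) =====
-- SECTION_ORDER = [
--     "background", "objective", "introduction",
--     "methods", "results", "discussion",
--     "conclusion", "references", "acknowledgements",
-- ]
--
-- def _get_ordered(sections: dict[str, str]) -> list[tuple[str, str]]:
--     """セクション辞書を標準順序でソートする"""
--     ordered = []
--     seen = set()
--
--     # 標準順序のセクションを先に
--     for key in SECTION_ORDER:
--         if key in sections:
--             ordered.append((key, sections[key]))
--             seen.add(key)
--
--     # 残りのセクション（標準外のキー）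
--     for key, value in sections.items():
--         if key not in seen:
--             ordered.append((key, value))
--
--     return ordered
-- ===== SOURCE B (Python) =====
-- SECTION_ORDER = [
--     "background", "objective", "introduction",
--     "methods", "results", "discussion",
--     "conclusion", "references", "acknowledgements",
-- ]
--
-- _RANK = {name: i for i, name in enumerate(SECTION_ORDER)}
--
-- def _get_ordered(sections: dict[str, str]) -> list[tuple[str, str]]:
--     """Single pass: drop each item into the bucket of its rank (extras last), then concatenate."""
--     extra = len(SECTION_ORDER)
--     groups: dict[int, list[tuple[str, str]]] = {}
--     for key, value in sections.items():
--         groups.setdefault(_RANK.get(key, extra), []).append((key, value))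
--     out = []
--     for r in range(extra + 1):
--         out.extend(groups.get(r, []))
--     return out
-- ===== Notes on version B (the rewrite author's own statement) =====
-- stated objective: alternative
-- what changed: Replaces A's two passes (scan the fixed SECTION_ORDER list with membership tests into the dict plus a second pass over the dict with a seen-set) by a single pass over the dict that buckets each item under its precomputed rank (extras get rank 9) and then concatenates the buckets in rank order.
import Mathlib
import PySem

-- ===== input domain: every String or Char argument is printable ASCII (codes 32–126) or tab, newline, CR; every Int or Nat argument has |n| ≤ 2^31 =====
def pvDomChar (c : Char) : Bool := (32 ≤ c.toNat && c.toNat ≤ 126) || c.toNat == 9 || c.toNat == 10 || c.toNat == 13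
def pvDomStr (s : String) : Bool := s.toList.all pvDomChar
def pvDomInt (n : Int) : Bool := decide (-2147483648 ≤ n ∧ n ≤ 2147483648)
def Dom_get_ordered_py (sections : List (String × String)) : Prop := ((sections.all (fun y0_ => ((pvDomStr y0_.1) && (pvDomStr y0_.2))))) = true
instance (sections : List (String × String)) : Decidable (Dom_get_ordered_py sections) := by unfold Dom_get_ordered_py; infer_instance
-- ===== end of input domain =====

-- B replaces A's two-pass ordered/seen bookkeeping by a single-pass bucket grouping keyed by a
-- precomputed rank table (extras ranked last); same cost, genuinely different traversal.


-- ===== PORT A =====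
def SECTION_ORDER_pv : List String :=
  ["background", "objective", "introduction",
   "methods", "results", "discussion",
   "conclusion", "references", "acknowledgements"]

-- body of A's first loop: `if key in sections: ordered.append((key, sections[key])); seen.add(key)`
def aStep (d : PySem.Dict String String)
    (st : List (String × String) × PySem.Set String) (key : String) :
    List (String × String) × PySem.Set String :=
  if d.contains key then (st.1 ++ [(key, d.getD key "")], st.2.add key) else st

def get_ordered_py (sections : List (String × String)) : List (String × String) :=
  let d := PySem.Dict.mk sections
  let st := SECTION_ORDER_pv.foldl (aStep d) ([], ([] : PySem.Set String))
  -- second loop: `for key, value in sections.items(): if key not in seen: ordered.append(...)`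
  sections.foldl (fun acc kv => if st.2.contains kv.1 then acc else acc ++ [kv]) st.1

-- ===== PORT B =====
-- _RANK = {name: i for i, name in enumerate(SECTION_ORDER)}
def bRank : PySem.Dict String Int :=
  PySem.Dict.ofList ((PySem.List.enumerate SECTION_ORDER_pv).map (fun p => (p.2, p.1)))

-- body of B's loop: `groups.setdefault(_RANK.get(key, extra), []).append((key, value))`
-- (setdefault-then-append on the shared list object = Dict.modify with default [])
def bStep (g : PySem.Dict Int (List (String × String))) (kv : String × String) :
    PySem.Dict Int (List (String × String)) :=
  g.modify (bRank.getD kv.1 (SECTION_ORDER_pv.length : Int)) [] (fun b => b ++ [kv])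

def get_ordered_py_alt (sections : List (String × String)) : List (String × String) :=
  let groups := sections.foldl bStep PySem.Dict.empty
  (PySem.List.pyRange 0 ((SECTION_ORDER_pv.length : Int) + 1) 1).foldl
    (fun out r => out ++ groups.getD r []) []

-- ===== PRECONDITION & SPEC =====
-- Pre_ excludes association lists with duplicate keys: the Python argument is a dict, whose
-- key list is always duplicate-free, so no actual Python input is excluded.
def Pre_get_ordered_py (sections : List (String × String)) : Prop :=
  (sections.map Prod.fst).Nodup
instance (sections : List (String × String)) : Decidable (Pre_get_ordered_py sections) := by
  unfold Pre_get_ordered_py; infer_instance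

def pvWitness_get_ordered_py : (List (String × String)) :=
  [("methods", "m"), ("zzz", "x"), ("background", "b")]

def Spec_get_ordered_py (sections : List (String × String)) (out : List (String × String)) : Prop := out = get_ordered_py_alt sections
instance (sections : List (String × String)) (out : List (String × String)) : Decidable (Spec_get_ordered_py sections out) := by unfold Spec_get_ordered_py; infer_instance

-- ===== CLAIM (what is proved, stated in full; the proofs are below) =====
def Claim_equal_get_ordered_py : Prop := ∀ (sections : List (String × String)), Dom_get_ordered_py sections → Pre_get_ordered_py sections → Spec_get_ordered_py sections (get_ordered_py sections)

-- ===== LEMMAS AND PROOFS =====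

-- `sections[key]` as an optional singleton: the block A's first loop appends for `key`.
def optPair (sections : List (String × String)) (k : String) : List (String × String) :=
  match (PySem.Dict.mk sections).get? k with
  | some v => [(k, v)]
  | none => []

-- the rank table in closed form
def rankFun (k : String) : Int :=
  if k = "background" then 0 else if k = "objective" then 1 else if k = "introduction" then 2
  else if k = "methods" then 3 else if k = "results" then 4 else if k = "discussion" then 5
  else if k = "conclusion" then 6 else if k = "references" then 7
  else if k = "acknowledgements" then 8 else 9

theorem bRank_getD (k : String) :
    bRank.getD k (SECTION_ORDER_pv.length : Int) = rankFun k := by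
  have h : bRank = PySem.Dict.mk
    [("background",0),("objective",1),("introduction",2),("methods",3),("results",4),
     ("discussion",5),("conclusion",6),("references",7),("acknowledgements",8)] := by decide
  have hl : ((SECTION_ORDER_pv.length : Nat) : Int) = 9 := by decide
  rw [h, hl]
  simp only [PySem.Dict.getD_eq_get?_getD, PySem.Dict.get?_mk_cons, rankFun, beq_iff_eq]
  by_cases h1 : "background" = k <;> by_cases h2 : "objective" = k <;>
    by_cases h3 : "introduction" = k <;> by_cases h4 : "methods" = k <;>
    by_cases h5 : "results" = k <;> by_cases h6 : "discussion" = k <;>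
    by_cases h7 : "conclusion" = k <;> by_cases h8 : "references" = k <;>
    by_cases h9 : "acknowledgements" = k <;>
    simp_all [eq_comm, PySem.Dict.get?]

theorem loopA_fst (sections : List (String × String)) :
    ∀ (ks : List String) (acc : List (String × String)) (seen : PySem.Set String),
      (ks.foldl (aStep (PySem.Dict.mk sections)) (acc, seen)).1 =
        acc ++ ks.flatMap (optPair sections) := by
  intro ks
  induction ks with
  | nil => intro acc seen; simp
  | cons k ks ih =>
    intro acc seen
    by_cases hc : (PySem.Dict.mk sections).contains k = true
    · have hv : ∃ v, (PySem.Dict.mk sections).get? k = some v := by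
        rw [PySem.Dict.contains_eq_isSome_get?] at hc
        exact Option.isSome_iff_exists.mp hc
      obtain ⟨v, hv⟩ := hv
      have hget : (PySem.Dict.mk sections).getD k "" = v := by
        simp [PySem.Dict.getD_eq_get?_getD, hv]
      simp only [List.foldl_cons, aStep, hc, if_true, ih, List.flatMap_cons, optPair, hv, hget]
      simp
    · simp only [Bool.not_eq_true] at hc
      have hn : (PySem.Dict.mk sections).get? k = none := by
        rw [PySem.Dict.contains_eq_isSome_get?] at hc
        simpa [Option.isSome_eq_false_iff, Option.isNone_iff_eq_none] using hc
      simp only [List.foldl_cons, aStep, hc, ih, List.flatMap_cons, optPair, hn]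
      simp

theorem loopA_snd (sections : List (String × String)) :
    ∀ (ks : List String) (acc : List (String × String)) (seen : PySem.Set String) (x : String),
      x ∈ (ks.foldl (aStep (PySem.Dict.mk sections)) (acc, seen)).2 ↔
        x ∈ seen ∨ (x ∈ ks ∧ (PySem.Dict.mk sections).contains x = true) := by
  intro ks
  induction ks with
  | nil => intro acc seen x; simp
  | cons k ks ih =>
    intro acc seen x
    by_cases hc : (PySem.Dict.mk sections).contains k = true
    · simp only [List.foldl_cons, aStep, hc, if_true, ih, PySem.Set.mem_add, List.mem_cons]
      constructor
      · rintro (⟨h | rfl⟩ | ⟨h1, h2⟩)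
        · exact Or.inl h
        · exact Or.inr ⟨Or.inl rfl, hc⟩
        · exact Or.inr ⟨Or.inr h1, h2⟩
      · rintro (h | ⟨(rfl | h1), h2⟩)
        · exact Or.inl (Or.inl h)
        · exact Or.inl (Or.inr rfl)
        · exact Or.inr ⟨h1, h2⟩
    · simp only [List.foldl_cons, aStep, hc, ih, List.mem_cons]
      constructor
      · rintro (h | ⟨h1, h2⟩)
        · exact Or.inl h
        · exact Or.inr ⟨Or.inr h1, h2⟩
      · rintro (h | ⟨(rfl | h1), h2⟩)
        · exact Or.inl h
        · exact absurd h2 hc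
        · exact Or.inr ⟨h1, h2⟩

theorem filter_eq_optPair (sections : List (String × String))
    (hnd : (sections.map Prod.fst).Nodup) (k : String) :
    sections.filter (fun kv => kv.1 == k) = optPair sections k := by
  induction sections with
  | nil => simp [optPair, PySem.Dict.get?]
  | cons a l ih =>
    obtain ⟨ka, va⟩ := a
    simp only [List.map_cons, List.nodup_cons] at hnd
    obtain ⟨hka, hndl⟩ := hnd
    by_cases h : ka = k
    · subst h
      have hfl : l.filter (fun kv => kv.1 == ka) = [] := by
        rw [List.filter_eq_nil_iff]
        intro kv hkv
        simp only [beq_iff_eq]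
        intro he
        exact hka (he ▸ List.mem_map_of_mem hkv)
      simp [optPair, PySem.Dict.get?_mk_cons, hfl]
    · have := ih hndl
      simp [optPair, PySem.Dict.get?_mk_cons, h] at this ⊢
      exact this

-- pointwise characterisations of the rank predicate
theorem rankFun_eq0 (k : String) : (rankFun k == (0:Int)) = (k == "background") := by
  unfold rankFun; split_ifs <;> simp_all
theorem rankFun_eq1 (k : String) : (rankFun k == (1:Int)) = (k == "objective") := by
  unfold rankFun; split_ifs <;> simp_all
theorem rankFun_eq2 (k : String) : (rankFun k == (2:Int)) = (k == "introduction") := by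
  unfold rankFun; split_ifs <;> simp_all
theorem rankFun_eq3 (k : String) : (rankFun k == (3:Int)) = (k == "methods") := by
  unfold rankFun; split_ifs <;> simp_all
theorem rankFun_eq4 (k : String) : (rankFun k == (4:Int)) = (k == "results") := by
  unfold rankFun; split_ifs <;> simp_all
theorem rankFun_eq5 (k : String) : (rankFun k == (5:Int)) = (k == "discussion") := by
  unfold rankFun; split_ifs <;> simp_all
theorem rankFun_eq6 (k : String) : (rankFun k == (6:Int)) = (k == "conclusion") := by
  unfold rankFun; split_ifs <;> simp_all
theorem rankFun_eq7 (k : String) : (rankFun k == (7:Int)) = (k == "references") := by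
  unfold rankFun; split_ifs <;> simp_all
theorem rankFun_eq8 (k : String) : (rankFun k == (8:Int)) = (k == "acknowledgements") := by
  unfold rankFun; split_ifs <;> simp_all
theorem rankFun_eq9 (k : String) : (rankFun k == (9:Int)) = !(SECTION_ORDER_pv.contains k) := by
  unfold rankFun SECTION_ORDER_pv; split_ifs <;> simp_all

-- A in closed form
theorem A_char (sections : List (String × String)) :
    get_ordered_py sections =
      SECTION_ORDER_pv.flatMap (optPair sections) ++
        sections.filter (fun kv => !(SECTION_ORDER_pv.contains kv.1)) := by
  unfold get_ordered_py
  simp only []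
  set st := SECTION_ORDER_pv.foldl (aStep (PySem.Dict.mk sections))
      ([], ([] : PySem.Set String)) with hst
  have h1 : st.1 = SECTION_ORDER_pv.flatMap (optPair sections) := by
    rw [hst, loopA_fst]; simp
  have hfun : (fun (acc : List (String × String)) kv =>
        if st.2.contains kv.1 then acc else acc ++ [kv]) =
      (fun acc kv => if (!st.2.contains kv.1) then acc ++ [(fun x => x) kv] else acc) := by
    funext acc kv; cases h : st.2.contains kv.1 <;> simp_all
  rw [hfun, PySem.List.foldl_append_if, h1, List.map_id_fun']
  congr 1
  apply List.filter_congr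
  intro kv hkv
  have hmem : (PySem.Dict.mk sections).contains kv.1 = true := by
    rw [PySem.Dict.contains_iff_mem_keys]
    exact List.mem_map_of_mem hkv
  have : st.2.contains kv.1 = SECTION_ORDER_pv.contains kv.1 := by
    rw [Bool.eq_iff_iff, PySem.Set.contains_iff, hst, loopA_snd]
    simp [hmem]
  rw [this]

-- B in closed form
theorem B_char (sections : List (String × String)) :
    get_ordered_py_alt sections =
      (sections.filter (fun kv => rankFun kv.1 == (0:Int))) ++
      (sections.filter (fun kv => rankFun kv.1 == (1:Int))) ++
      (sections.filter (fun kv => rankFun kv.1 == (2:Int))) ++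
      (sections.filter (fun kv => rankFun kv.1 == (3:Int))) ++
      (sections.filter (fun kv => rankFun kv.1 == (4:Int))) ++
      (sections.filter (fun kv => rankFun kv.1 == (5:Int))) ++
      (sections.filter (fun kv => rankFun kv.1 == (6:Int))) ++
      (sections.filter (fun kv => rankFun kv.1 == (7:Int))) ++
      (sections.filter (fun kv => rankFun kv.1 == (8:Int))) ++
      (sections.filter (fun kv => rankFun kv.1 == (9:Int))) := by
  unfold get_ordered_py_alt
  have hstep : bStep = (fun g kv =>
      g.modify (rankFun kv.1) [] (fun b => b ++ [kv])) := by
    funext g kv; unfold bStep; rw [bRank_getD]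
  have hfold : sections.foldl bStep PySem.Dict.empty =
      (sections.map (fun kv => (rankFun kv.1, kv))).foldl
        (fun d p => d.modify p.1 [] (fun x => x ++ [p.2])) PySem.Dict.empty := by
    rw [List.foldl_map, hstep]
  have hget : ∀ r : Int,
      (sections.foldl bStep PySem.Dict.empty).getD r [] =
        sections.filter (fun kv => rankFun kv.1 == r) := by
    intro r
    rw [hfold, PySem.Dict.getD_foldl_modify_append]
    simp [PySem.Dict.getD_empty, List.filter_map, Function.comp_def]
  have hr : PySem.List.pyRange 0 ((SECTION_ORDER_pv.length : Int) + 1) 1 =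
      [0,1,2,3,4,5,6,7,8,9] := by decide
  rw [hr]
  simp only [List.foldl_cons, List.foldl_nil, hget]
  simp [List.append_assoc]

-- ===== VERDICT (by name: the statement is the Claim_ definition above) =====
theorem get_ordered_py_spec : Claim_equal_get_ordered_py := by
  intro sections _hdom hpre
  unfold Spec_get_ordered_py
  rw [A_char sections, B_char sections]
  have e0 : sections.filter (fun kv => rankFun kv.1 == (0:Int)) = sections.filter (fun kv => kv.1 == "background") := List.filter_congr (fun kv _ => rankFun_eq0 kv.1)
  have e1 : sections.filter (fun kv => rankFun kv.1 == (1:Int)) = sections.filter (fun kv => kv.1 == "objective") := List.filter_congr (fun kv _ => rankFun_eq1 kv.1)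
  have e2 : sections.filter (fun kv => rankFun kv.1 == (2:Int)) = sections.filter (fun kv => kv.1 == "introduction") := List.filter_congr (fun kv _ => rankFun_eq2 kv.1)
  have e3 : sections.filter (fun kv => rankFun kv.1 == (3:Int)) = sections.filter (fun kv => kv.1 == "methods") := List.filter_congr (fun kv _ => rankFun_eq3 kv.1)
  have e4 : sections.filter (fun kv => rankFun kv.1 == (4:Int)) = sections.filter (fun kv => kv.1 == "results") := List.filter_congr (fun kv _ => rankFun_eq4 kv.1)
  have e5 : sections.filter (fun kv => rankFun kv.1 == (5:Int)) = sections.filter (fun kv => kv.1 == "discussion") := List.filter_congr (fun kv _ => rankFun_eq5 kv.1)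
  have e6 : sections.filter (fun kv => rankFun kv.1 == (6:Int)) = sections.filter (fun kv => kv.1 == "conclusion") := List.filter_congr (fun kv _ => rankFun_eq6 kv.1)
  have e7 : sections.filter (fun kv => rankFun kv.1 == (7:Int)) = sections.filter (fun kv => kv.1 == "references") := List.filter_congr (fun kv _ => rankFun_eq7 kv.1)
  have e8 : sections.filter (fun kv => rankFun kv.1 == (8:Int)) = sections.filter (fun kv => kv.1 == "acknowledgements") := List.filter_congr (fun kv _ => rankFun_eq8 kv.1)
  have e9 : sections.filter (fun kv => rankFun kv.1 == (9:Int)) = sections.filter (fun kv => !(SECTION_ORDER_pv.contains kv.1)) := List.filter_congr (fun kv _ => rankFun_eq9 kv.1)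
  rw [e0, e1, e2, e3, e4, e5, e6, e7, e8, e9]
  rw [filter_eq_optPair sections hpre, filter_eq_optPair sections hpre,
      filter_eq_optPair sections hpre, filter_eq_optPair sections hpre,
      filter_eq_optPair sections hpre, filter_eq_optPair sections hpre,
      filter_eq_optPair sections hpre, filter_eq_optPair sections hpre,
      filter_eq_optPair sections hpre]
  simp [SECTION_ORDER_pv, List.flatMap_cons, List.append_assoc]
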